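-- pv_equiv track=rewrite | github.com/mattmeyers/advent-of-code | 2025/d02/main.py | window_is_valid
-- ===== SOURCE A (Python) =====
-- def window_is_valid(value: str, window_size: int) -> bool:
--     if len(value) % window_size != 0:
--         return True
--
--     current = value[0:window_size]
--     for j in range(1, len(value) // window_size):
--         next = value[window_size * j:window_size*(j+1)]
--         if current != next:
--             return True
--
--         current = next
--
--     return False
-- ===== SOURCE B (Python) =====
-- def window_is_valid(value: str, window_size: int) -> bool:
--     if len(value) % window_size != 0:
--         return True
--     count = len(value) // window_size
--     return value != value[:window_size] * count
-- ===== Notes on version B (the rewrite author's own statement) =====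
-- stated objective: simpler
-- what changed: Replaces the explicit loop comparing each adjacent pair of windows with a single comparison of the whole string against its first window replicated len(value)//window_size times.
-- outside the precondition, e.g. on window_is_valid('abcd', -2): A returns False, B returns True; on window_is_valid('ab', 0): A raises ZeroDivisionError, B raises ZeroDivisionError
import Mathlib
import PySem

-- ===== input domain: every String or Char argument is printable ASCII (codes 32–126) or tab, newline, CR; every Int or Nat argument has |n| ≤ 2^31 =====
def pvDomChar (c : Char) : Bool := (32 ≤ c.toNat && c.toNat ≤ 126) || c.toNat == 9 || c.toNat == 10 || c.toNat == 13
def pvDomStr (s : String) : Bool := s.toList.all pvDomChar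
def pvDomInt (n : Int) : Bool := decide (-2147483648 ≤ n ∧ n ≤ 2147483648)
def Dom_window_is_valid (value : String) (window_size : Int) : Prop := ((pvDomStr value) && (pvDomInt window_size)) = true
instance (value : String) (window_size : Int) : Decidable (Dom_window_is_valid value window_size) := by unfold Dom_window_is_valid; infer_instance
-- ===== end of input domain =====

-- B replaces A's loop over adjacent windows by one comparison of the string with its
-- first window replicated len//window_size times (objective: simpler; equal cost).

-- ===== PORT A =====
-- the for-loop over j in range(1, len(value)//window_size), carrying `current`,
-- with the early `return True` as the `true` branch
def wvLoop (L : List Char) (ws : Int) : List Char → List Int → Bool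
  | _, [] => false
  | current, j :: rest =>
    let next := PySem.List.slice L (some (ws * j)) (some (ws * (j + 1)))
    if current ≠ next then true
    else wvLoop L ws next rest

def window_is_valid (value : String) (window_size : Int) : Bool :=
  if PySem.Int.mod (PySem.Str.len value) window_size ≠ 0 then true
  else
    wvLoop value.toList window_size
      (PySem.List.slice value.toList (some 0) (some window_size))
      (PySem.List.pyRange 1 (PySem.Int.floordiv (PySem.Str.len value) window_size))

-- ===== PORT B =====
def window_is_valid_alt (value : String) (window_size : Int) : Bool :=
  if PySem.Int.mod (PySem.Str.len value) window_size ≠ 0 then true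
  else
    -- count = len(value) // window_size;  Python `s * count` with count ≤ 0 is '',
    -- which Int.toNat reproduces exactly
    let count := PySem.Int.floordiv (PySem.Str.len value) window_size
    decide (value.toList ≠
      (List.replicate count.toNat (PySem.List.slice value.toList none (some window_size))).flatten)

-- ===== PRECONDITION & SPEC =====
-- Pre_ excludes window_size ≤ 0: at window_size = 0 A raises ZeroDivisionError (so does B),
-- and negative window sizes lie outside the natural domain of a window check, so B does not
-- reproduce A's accidental values there (see the cites in the claim).
def Pre_window_is_valid (value : String) (window_size : Int) : Prop := 1 ≤ window_size
instance (value : String) (window_size : Int) : Decidable (Pre_window_is_valid value window_size) := by unfold Pre_window_is_valid; infer_instance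
def pvWitness_window_is_valid : String × Int := ("abab", 2)

def Spec_window_is_valid (value : String) (window_size : Int) (out : Bool) : Prop := out = window_is_valid_alt value window_size
instance (value : String) (window_size : Int) (out : Bool) : Decidable (Spec_window_is_valid value window_size out) := by unfold Spec_window_is_valid; infer_instance

-- ===== CLAIM (what is proved, stated in full; the proofs are below) =====
def Claim_equal_window_is_valid : Prop := ∀ (value : String) (window_size : Int), Dom_window_is_valid value window_size → Pre_window_is_valid value window_size → Spec_window_is_valid value window_size (window_is_valid value window_size)

-- ===== LEMMAS AND PROOFS =====

theorem wvBoolEq (x y : Bool) (h : (x = false) ↔ (y = false)) : x = y := by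
  cases x <;> cases y <;> simp_all

-- A's loop returns false iff every window of the traversed range equals the carried value
theorem wvLoop_false_iff (L : List Char) (ws : Int) (b : Int) :
    ∀ (n : Nat) (a : Int) (current : List Char), (b - a).toNat = n →
      (wvLoop L ws current (PySem.List.pyRange a b) = false ↔
        ∀ j : Int, a ≤ j → j < b →
          PySem.List.slice L (some (ws * j)) (some (ws * (j + 1))) = current) := by
  intro n
  induction n with
  | zero =>
    intro a current h
    rw [PySem.List.pyRange_one_eq_nil (by omega)]
    simp only [wvLoop]
    constructor
    · intro _ j h1 h2; omega
    · intro _; trivial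
  | succ m ih =>
    intro a current h
    have hab : a < b := by omega
    rw [PySem.List.pyRange_one_cons hab]
    simp only [wvLoop]
    by_cases hne : current ≠ PySem.List.slice L (some (ws * a)) (some (ws * (a + 1)))
    · simp only [if_pos hne]
      constructor
      · intro hfalse; exact absurd hfalse (by simp)
      · intro hall
        exact absurd ((hall a le_rfl hab).symm) hne
    · rw [ne_eq, not_not] at hne
      rw [if_neg (not_not_intro hne)]
      rw [ih (a + 1) _ (by omega)]
      constructor
      · intro hall j h1 h2
        rcases eq_or_lt_of_le h1 with rfl | h1'
        · exact hne.symm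
        · rw [hall j (by omega) h2, hne]
      · intro hall j h1 h2
        rw [hall j (by omega) h2, ← hne]

-- the slice [w*k : w*(k+1)] is the k-th window, as drop/take over Nat
theorem slice_eq_win (L : List Char) (w k : Nat) :
    PySem.List.slice L (some ((w : Int) * (k : Int))) (some ((w : Int) * ((k : Int) + 1))) =
      (L.drop (w * k)).take w := by
  rw [PySem.List.slice_toNat _ (by positivity) (by positivity)]
  have h1 : ((w : Int) * (k : Int)).toNat = w * k := by
    rw [← Int.natCast_mul, Int.toNat_natCast]
  have h2 : ((w : Int) * ((k : Int) + 1)).toNat = w * (k + 1) := by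
    have : (w : Int) * ((k : Int) + 1) = ((w * (k + 1) : Nat) : Int) := by push_cast; ring
    rw [this, Int.toNat_natCast]
  rw [h1, h2]
  have : w * (k + 1) - w * k = w := by
    rw [Nat.mul_succ]; omega
  rw [this]

-- a string of length cn*w is the first window replicated cn times iff every window
-- equals the first one
theorem repl_iff (w : Nat) (hw : 0 < w) :
    ∀ (cn : Nat) (L : List Char), L.length = cn * w →
      ((L = (List.replicate cn (L.take w)).flatten) ↔
        ∀ k : Nat, k < cn → (L.drop (w * k)).take w = L.take w) := by
  intro cn
  induction cn with
  | zero =>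
    intro L hL
    simp at hL
    simp [hL]
  | succ m ih =>
    intro L hL
    have hwle : w ≤ L.length := by rw [hL]; nlinarith
    have htw : (L.take w).length = w := by simp [hwle]
    have hL' : (L.drop w).length = m * w := by
      simp [hL, Nat.succ_mul]
    have hsplit : L = L.take w ++ L.drop w := (List.take_append_drop w L).symm
    have hwin : ∀ k : Nat, ((L.drop w).drop (w * k)).take w = (L.drop (w * (k + 1))).take w := by
      intro k
      rw [List.drop_drop]
      congr 1
      congr 1
      rw [Nat.mul_succ]; omega
    have hflat : (List.replicate (m + 1) (L.take w)).flatten =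
        L.take w ++ (List.replicate m (L.take w)).flatten := by
      rw [List.replicate_succ, List.flatten_cons]
    constructor
    · intro heq k hk
      rcases Nat.eq_zero_or_pos k with rfl | hk0
      · simp
      · -- use the IH on L.drop w
        have hdrop : L.drop w = (List.replicate m (L.take w)).flatten := by
          rw [hflat] at heq
          exact List.append_cancel_left (hsplit.symm.trans heq)
        rcases Nat.eq_zero_or_pos m with rfl | hm0
        · omega
        · have htw' : (L.drop w).take w = L.take w := by
            rw [hdrop]
            rcases Nat.exists_eq_succ_of_ne_zero (Nat.pos_iff_ne_zero.mp hm0) with ⟨m', rfl⟩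
            rw [List.replicate_succ, List.flatten_cons, List.take_append_of_le_length (by simp [hwle])]
            simp [hwle]
          have := (ih (L.drop w) hL').mp (by rw [htw', hdrop]) (k - 1) (by omega)
          rw [htw', hwin (k - 1)] at this
          have hk1 : k - 1 + 1 = k := by omega
          rw [hk1] at this
          exact this
    · intro hall
      rcases Nat.eq_zero_or_pos m with rfl | hm0
      · have hnil : L.drop w = [] := by
          have : (L.drop w).length = 0 := by simp [hL']
          exact List.eq_nil_of_length_eq_zero this
        rw [hflat]
        simp only [List.replicate_zero, List.flatten_nil, List.append_nil]
        conv_lhs => rw [hsplit]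
        rw [hnil, List.append_nil]
      · have htw' : (L.drop w).take w = L.take w := by
          have h1 := hall 1 (by omega)
          rw [Nat.mul_one] at h1
          exact h1
        have hall' : ∀ k : Nat, k < m → ((L.drop w).drop (w * k)).take w = (L.drop w).take w := by
          intro k hk
          rw [hwin k, htw']
          exact hall (k + 1) (by omega)
        have hdrop := (ih (L.drop w) hL').mpr hall'
        rw [htw'] at hdrop
        rw [hflat, ← hdrop]
        exact hsplit

-- ===== VERDICT (by name: the statement is the Claim_ definition above) =====
theorem window_is_valid_spec : Claim_equal_window_is_valid := by
  intro value ws _ hpre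
  unfold Pre_window_is_valid at hpre
  unfold Spec_window_is_valid
  unfold window_is_valid window_is_valid_alt
  by_cases hmod : PySem.Int.mod (PySem.Str.len value) ws = 0
  · rw [if_neg (not_not_intro hmod), if_neg (not_not_intro hmod)]
    set L := value.toList with hLdef
    set w := ws.toNat with hwdef
    have hws : ws = (w : Int) := by omega
    have hw0 : 0 < w := by omega
    -- divisibility: the length is a multiple of w
    have hdvd : ws ∣ PySem.Str.len value := (PySem.Int.mod_eq_zero_iff_dvd _ _).mp hmod
    rw [PySem.Str.len_eq] at hdvd ⊢
    have hdvdN : w ∣ L.length := by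
      rw [hws] at hdvd
      exact_mod_cast hdvd
    obtain ⟨cn, hcn⟩ : ∃ cn, L.length = cn * w := by
      obtain ⟨c, hc⟩ := hdvdN; exact ⟨c, by rw [hc, Nat.mul_comm]⟩
    -- count = cn
    have hfd : PySem.Int.floordiv ((L.length : Int)) ws = (cn : Int) := by
      unfold PySem.Int.floordiv
      rw [hws, hcn, Int.fdiv_eq_ediv]
      rw [if_pos (Or.inl (by positivity : (0:Int) ≤ (w : Int))), sub_zero]
      push_cast
      rw [mul_comm]
      exact Int.mul_ediv_cancel_left _ (by exact_mod_cast (by omega : w ≠ 0))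
    -- the initial window
    have hinit : PySem.List.slice L (some 0) (some ws) = L.take w := by
      rw [PySem.List.slice_toNat _ le_rfl (by omega)]
      simp [hwdef]
    have hslice0 : PySem.List.slice L none (some ws) = L.take w := by
      rw [PySem.List.slice_to _ (by omega)]
    rw [hfd, hinit, hslice0]
    show wvLoop L ws (List.take w L) (PySem.List.pyRange 1 (cn : Int)) =
      decide (L ≠ (List.replicate ((cn : Int)).toNat (List.take w L)).flatten)
    rw [Int.toNat_natCast]
    -- both sides as false-iff
    have hA := wvLoop_false_iff L ws (cn : Int) ((cn : Int) - 1).toNat 1 (L.take w) rfl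
    have hB := repl_iff w hw0 cn L hcn
    have hbridge :
        (∀ j : Int, 1 ≤ j → j < (cn : Int) →
            PySem.List.slice L (some (ws * j)) (some (ws * (j + 1))) = L.take w) ↔
        (∀ k : Nat, k < cn → (L.drop (w * k)).take w = L.take w) := by
      constructor
      · intro hall k hk
        rcases Nat.eq_zero_or_pos k with rfl | hk0
        · simp
        · have := hall (k : Int) (by exact_mod_cast hk0) (by exact_mod_cast hk)
          rw [hws, slice_eq_win] at this
          exact this
      · intro hall j h1 h2
        have hj : j = ((j.toNat : Nat) : Int) := by omega
        rw [hws, hj, slice_eq_win]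
        exact hall j.toNat (by omega)
    have hiff : (wvLoop L ws (L.take w) (PySem.List.pyRange 1 (cn : Int)) = false) ↔
        (decide (L ≠ (List.replicate cn (L.take w)).flatten) = false) := by
      rw [hA, decide_eq_false_iff_not, not_not, hB]
      exact hbridge
    exact wvBoolEq _ _ hiff
  · rw [if_pos hmod, if_pos hmod]
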